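-- pv_equiv track=rewrite | github.com/Bennyhwanggggg/Algorithm-and-Data-Structures-and-Coding-Challenges | Challenges/memorizePhoneNumber.py | getQuality
-- ===== SOURCE A (Python) =====
-- def getQuality(nums, startIndex, groupLength):
--     if startIndex + groupLength > len(nums):
--         raise ValueError('startIndex + groupLength > len(nums)')
--     if groupLength == 2:
--         if nums[startIndex] == nums[startIndex+1]:
--             return 2
--         else:
--             return 0
--     elif groupLength == 3:
--         if all(nums[i] == nums[i+1] for i in range(startIndex, startIndex + groupLength - 1)):
--             return 2
--         elif any(nums[i] == nums[j] for i in range(startIndex, startIndex + groupLength - 1) for j in range(i + 1, startIndex + groupLength)):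
--             return 1
--         else:
--             return 0
--     else:
--         raise ValueError('groupLength must equal 2 or 3')
-- ===== SOURCE B (Python) =====
-- def getQuality(nums, startIndex, groupLength):
--     if startIndex + groupLength > len(nums):
--         raise ValueError('startIndex + groupLength > len(nums)')
--     if groupLength not in (2, 3):
--         raise ValueError('groupLength must equal 2 or 3')
--     d = len({nums[startIndex + k] for k in range(groupLength)})
--     if groupLength == 2:
--         return 2 if d == 1 else 0
--     return 3 - d
-- ===== Notes on version B (the rewrite author's own statement) =====
-- stated objective: simpler
-- what changed: B replaces A's pairwise all/any comparison loops with a single distinct-digit count over the group (a set), returning 2/0 for pairs and 3-d for triples.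
import Mathlib
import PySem

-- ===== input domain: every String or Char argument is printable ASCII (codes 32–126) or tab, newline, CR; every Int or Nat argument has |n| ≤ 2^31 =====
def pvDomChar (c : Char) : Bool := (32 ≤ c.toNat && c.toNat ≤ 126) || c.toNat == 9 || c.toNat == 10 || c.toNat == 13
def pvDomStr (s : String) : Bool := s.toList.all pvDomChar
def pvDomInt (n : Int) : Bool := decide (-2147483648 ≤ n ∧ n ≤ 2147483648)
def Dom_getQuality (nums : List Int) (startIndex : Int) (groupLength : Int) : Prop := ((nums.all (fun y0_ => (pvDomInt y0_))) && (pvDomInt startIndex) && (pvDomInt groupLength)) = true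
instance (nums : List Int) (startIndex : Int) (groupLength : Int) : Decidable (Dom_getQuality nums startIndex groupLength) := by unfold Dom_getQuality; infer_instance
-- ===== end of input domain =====

-- B replaces A's pairwise all/any comparison loops by a distinct-digit count over the group
-- (objective: simpler); return values are identical wherever A returns.

-- ===== PORT A =====
-- literal port of A; the raise paths return 0 and are excluded by Pre_getQuality
def getQuality (nums : List Int) (startIndex : Int) (groupLength : Int) : Int :=
  if startIndex + groupLength > nums.length then 0
  else if groupLength = 2 then
    if PySem.List.pyGetD nums startIndex 0 = PySem.List.pyGetD nums (startIndex + 1) 0 then 2 else 0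
  else if groupLength = 3 then
    if (PySem.List.pyRange startIndex (startIndex + groupLength - 1) 1).all
        (fun i => PySem.List.pyGetD nums i 0 == PySem.List.pyGetD nums (i + 1) 0) then 2
    else if (PySem.List.pyRange startIndex (startIndex + groupLength - 1) 1).any
        (fun i => (PySem.List.pyRange (i + 1) (startIndex + groupLength) 1).any
          (fun j => PySem.List.pyGetD nums i 0 == PySem.List.pyGetD nums j 0)) then 1
    else 0
  else 0

-- ===== PORT B =====
-- literal port of Source B; the raise paths return 0 and are excluded by Pre_getQuality
def getQuality_alt (nums : List Int) (startIndex : Int) (groupLength : Int) : Int :=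
  if startIndex + groupLength > nums.length then 0
  else if ¬ (groupLength = 2 ∨ groupLength = 3) then 0
  else
    let group := (PySem.List.pyRange 0 groupLength 1).map (fun k => PySem.List.pyGetD nums (startIndex + k) 0)
    let d : Int := PySem.Set.len (PySem.Set.ofList group)
    if groupLength = 2 then (if d = 1 then 2 else 0) else 3 - d

-- ===== PRECONDITION & SPEC =====
-- Pre_ excludes exactly the inputs where A raises (ValueError on the two guards, IndexError below -len)
def Pre_getQuality (nums : List Int) (startIndex : Int) (groupLength : Int) : Prop :=
  (groupLength = 2 ∨ groupLength = 3) ∧ startIndex + groupLength ≤ nums.length ∧ -(nums.length : Int) ≤ startIndex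
instance (nums : List Int) (startIndex : Int) (groupLength : Int) : Decidable (Pre_getQuality nums startIndex groupLength) := by unfold Pre_getQuality; infer_instance

def pvWitness_getQuality : List Int × Int × Int := ([1, 1, 2], 0, 3)

def Spec_getQuality (nums : List Int) (startIndex : Int) (groupLength : Int) (out : Int) : Prop := out = getQuality_alt nums startIndex groupLength
instance (nums : List Int) (startIndex : Int) (groupLength : Int) (out : Int) : Decidable (Spec_getQuality nums startIndex groupLength out) := by unfold Spec_getQuality; infer_instance

-- ===== CLAIM (what is proved, stated in full; the proofs are below) =====
def Claim_equal_getQuality : Prop := ∀ (nums : List Int) (startIndex : Int) (groupLength : Int), Dom_getQuality nums startIndex groupLength → Pre_getQuality nums startIndex groupLength → Spec_getQuality nums startIndex groupLength (getQuality nums startIndex groupLength)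

-- ===== LEMMAS AND PROOFS =====

lemma range2 (s : Int) : PySem.List.pyRange s (s + 2) 1 = [s, s + 1] := by
  rw [PySem.List.pyRange_one_cons (by omega)]
  rw [show s + 2 = (s + 1) + 1 by ring, PySem.List.pyRange_one_singleton]

-- ===== VERDICT (by name: the statement is the Claim_ definition above) =====
theorem getQuality_spec : Claim_equal_getQuality := by
  intro nums s g _ ⟨hg, hle, hlo⟩
  unfold Spec_getQuality getQuality getQuality_alt
  have e : s + 1 + 1 = s + 2 := by ring
  rcases hg with rfl | rfl
  · simp only [if_neg (by omega : ¬ s + 2 > (nums.length : Int))]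
    rw [show PySem.List.pyRange 0 2 1 = [0, 1] from by decide]
    simp only [List.map, add_zero]
    by_cases hab : PySem.List.pyGetD nums s 0 = PySem.List.pyGetD nums (s + 1) 0 <;>
      simp [PySem.Set.ofList, PySem.Set.add, PySem.Set.contains, PySem.Set.len, hab, eq_comm]
  · simp only [if_neg (by omega : ¬ s + 3 > (nums.length : Int)),
      if_neg (by omega : ¬ (3 : Int) = 2)]
    rw [show s + 3 - 1 = s + 2 by ring, range2,
      show PySem.List.pyRange 0 3 1 = [0, 1, 2] from by decide]
    have h1 : PySem.List.pyRange (s + 1) (s + 3) 1 = [s + 1, s + 2] := by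
      rw [show s + 3 = (s + 1) + 2 by ring, range2]; ring_nf
    have h2 : PySem.List.pyRange (s + 1 + 1) (s + 3) 1 = [s + 2] := by
      rw [e, show s + 3 = (s + 2) + 1 by ring, PySem.List.pyRange_one_singleton]
    simp only [List.map, add_zero, List.all_cons, List.any_cons, List.all_nil, List.any_nil,
      h1, e]
    simp only [PySem.Set.ofList, List.foldl, PySem.Set.add, PySem.Set.contains,
      PySem.Set.len]
    split_ifs <;> simp_all <;> omega
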